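-- pv_equiv track=rewrite | github.com/nikolaosJP/cost_of_living_scraper | src/web_scraper.py | parse_city_arguments
-- ===== SOURCE A (Python) =====
-- def parse_city_arguments(args, country_list):
--     """
--     Parse the space-separated countries and cities into a dictionary.
--     Countries will be followed by their cities, until a new country appears.
--     Handles hyphenated multi-word country and city names.
--     """
--     country_city_dict = {}
--     current_country = None
--
--     for arg in args:
--         # Replace hyphens with spaces
--         arg_clean = arg.replace('-', ' ')
--
--         if arg_clean in country_list:
--             current_country = arg_clean
--             country_city_dict[current_country] = []
--         elif current_country:
--             # If it's not a country, treat it as a city for the current country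
--             country_city_dict[current_country].append(arg_clean)
--
--     return country_city_dict
-- ===== SOURCE B (Python) =====
-- def parse_city_arguments(args, country_list):
--     clean = [a.replace('-', ' ') for a in args]
--     countries = set(country_list)
--     res = {}
--     i, n = 0, len(clean)
--     while i < n:
--         x = clean[i]
--         i += 1
--         if x in countries:
--             j = i
--             while j < n and clean[j] not in countries:
--                 j += 1
--             res[x] = clean[i:j]
--             i = j
--     return res
-- ===== Notes on version B (the rewrite author's own statement) =====
-- stated objective: faster
-- what changed: B first cleans all arguments and builds the country set once, then scans the cleaned list span-by-span with an index: at each country it finds the end of the following non-country run with an inner scan and assigns that slice, instead of A's one-token-at-a-time loop that threads a current-country state, tests list membership per token and appends each city into the dict.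
-- intended difference: When '' is in country_list and the last argument that cleans to '' is followed by a non-country argument, A's truthiness test `elif current_country:` silently discards those cities (its '' entry is always []), while B records them under the '' country as intended. — e.g. on parse_city_arguments(["", "x"], [""]): A returns [("", [])], B returns [("", ["x"])]
import Mathlib
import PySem

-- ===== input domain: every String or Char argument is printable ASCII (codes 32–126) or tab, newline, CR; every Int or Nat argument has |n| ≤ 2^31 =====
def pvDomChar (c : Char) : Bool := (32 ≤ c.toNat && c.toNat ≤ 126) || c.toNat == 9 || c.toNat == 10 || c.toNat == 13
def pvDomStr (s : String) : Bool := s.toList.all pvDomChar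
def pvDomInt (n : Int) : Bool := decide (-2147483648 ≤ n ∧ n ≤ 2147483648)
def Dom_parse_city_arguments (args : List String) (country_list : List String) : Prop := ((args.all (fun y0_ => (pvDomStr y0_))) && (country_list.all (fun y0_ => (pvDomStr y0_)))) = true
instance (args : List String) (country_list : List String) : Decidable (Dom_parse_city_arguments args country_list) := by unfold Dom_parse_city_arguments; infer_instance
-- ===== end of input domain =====

-- B cleans the arguments, builds the country set once, and then groups span-by-span
-- (country, following run of non-countries) with an index scan, instead of A's
-- one-token-at-a-time loop threading a current-country state and appending each city.
-- Equivalence is about the RETURN value; D_ below states the one intended difference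
-- (A's Python truthiness test drops the cities that follow an empty-string country).

-- ===== PORT A =====
-- Literal port of A's loop: state = (dict, current_country).  `elif current_country:` is
-- Python truthiness, i.e. fires only when current_country is a non-None, NON-EMPTY string.
-- `country_city_dict[current_country].append(...)` is ported as `modify cur []`; the key is
-- always present when that line runs (it was inserted when cur was set), so the default []
-- is never used and the port is exact.
def parse_city_arguments (args : List String) (country_list : List String) : List (String × List String) :=
  ((args.foldl
      (fun (st : PySem.Dict String (List String) × Option String) arg =>
        let arg_clean := PySem.Str.replace arg "-" " "
        if country_list.contains arg_clean then
          (st.1.insert arg_clean ([] : List String), some arg_clean)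
        else
          match st.2 with
          | some cur =>
              if cur == "" then st
              else (st.1.modify cur [] (fun l => l ++ [arg_clean]), st.2)
          | none => st)
      (PySem.Dict.empty, (none : Option String))).1).items

-- ===== PORT B =====
-- B's outer while-loop over the cleaned list: at a country, the inner while-loop collects the
-- run of following non-countries (takeWhile) and resumes after it (dropWhile); `countries`
-- is Python's set(country_list).
def pcaAltLoop (countries : PySem.Set String) (res : PySem.Dict String (List String)) :
    (xs : List String) → PySem.Dict String (List String)
  | [] => res
  | x :: rest =>
    if PySem.Set.contains countries x then
      pcaAltLoop countries
        (res.insert x (rest.takeWhile (fun y => !PySem.Set.contains countries y)))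
        (rest.dropWhile (fun y => !PySem.Set.contains countries y))
    else
      pcaAltLoop countries res rest
termination_by xs => xs.length
decreasing_by
  · exact Nat.lt_succ_of_le (List.length_dropWhile_le _ _)
  · simp

def parse_city_arguments_alt (args : List String) (country_list : List String) : List (String × List String) :=
  (pcaAltLoop (PySem.Set.ofList country_list) PySem.Dict.empty
      (args.map (fun a => PySem.Str.replace a "-" " "))).items

-- ===== PRECONDITION & SPEC =====
-- A's `elif current_country:` tests Python truthiness, so when the current country is the
-- empty string ("" is in country_list and some argument cleans to ""), A silently discards
-- the cities that follow it (its '' entry is always []); B records the cities that follow the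
-- LAST such '' argument, as intended.  (An argument cleans to "" iff it is "" itself.)
def D_parse_city_arguments (args : List String) (country_list : List String) : Prop :=
  (country_list.contains "" && args.contains "" &&
    (args.reverse.takeWhile (· != "")).getLast?.any
      (fun y => !country_list.contains (String.ofList (y.toList.map fun c => if c == '-' then ' ' else c)))) = true
instance (args : List String) (country_list : List String) : Decidable (D_parse_city_arguments args country_list) := by
  unfold D_parse_city_arguments; infer_instance

def Spec_parse_city_arguments (args : List String) (country_list : List String) (out : List (String × List String)) : Prop :=
  ¬ D_parse_city_arguments args country_list → out = parse_city_arguments_alt args country_list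
instance (args : List String) (country_list : List String) (out : List (String × List String)) : Decidable (Spec_parse_city_arguments args country_list out) := by
  unfold Spec_parse_city_arguments; infer_instance

def pvDiffWitness_parse_city_arguments : List String × List String := (["", "x"], [""])
def pvDiffWitnessOut_parse_city_arguments : (List (String × List String)) × (List (String × List String)) :=
  ([("", [])], [("", ["x"])])

-- ===== CLAIM (what is proved, stated in full; the proofs are below) =====
def Claim_unchanged_parse_city_arguments : Prop := ∀ (args : List String) (country_list : List String), Dom_parse_city_arguments args country_list → Spec_parse_city_arguments args country_list (parse_city_arguments args country_list)
def Claim_changed_parse_city_arguments : Prop := Dom_parse_city_arguments (pvDiffWitness_parse_city_arguments.1) (pvDiffWitness_parse_city_arguments.2) ∧ D_parse_city_arguments (pvDiffWitness_parse_city_arguments.1) (pvDiffWitness_parse_city_arguments.2) ∧ parse_city_arguments (pvDiffWitness_parse_city_arguments.1) (pvDiffWitness_parse_city_arguments.2) = pvDiffWitnessOut_parse_city_arguments.1 ∧ parse_city_arguments_alt (pvDiffWitness_parse_city_arguments.1) (pvDiffWitness_parse_city_arguments.2) = pvDiffWitnessOut_parse_city_arguments.2 ∧ pvDiffWitnessOut_parse_city_arguments.1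 ≠ pvDiffWitnessOut_parse_city_arguments.2
def Claim_exact_parse_city_arguments : Prop := ∀ (args : List String) (country_list : List String), Dom_parse_city_arguments args country_list → D_parse_city_arguments args country_list → parse_city_arguments args country_list ≠ parse_city_arguments_alt args country_list

-- ===== LEMMAS AND PROOFS =====

-- the hyphen→space cleaning, character-wise (proved equal to the ports' str.replace below)
def pvHyph (s : String) : String := String.ofList (s.toList.map (fun c => if c == '-' then ' ' else c))

theorem pvHyph_go (fuel : Nat) : ∀ (l acc : List Char), fuel = l.length →
    PySem.Chars.replace.go ['-'] [' '] fuel l acc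
      = acc.reverse ++ l.map (fun ch => if ch == '-' then ' ' else ch) := by
  induction fuel with
  | zero =>
    intro l acc h
    cases l with
    | nil => simp [PySem.Chars.replace.go]
    | cons c t => simp at h
  | succ n ih =>
    intro l acc h
    cases l with
    | nil => simp at h
    | cons c t =>
      rw [PySem.Chars.replace.go]
      by_cases hc : c = '-'
      · subst hc
        have hpre : List.isPrefixOf ['-'] ('-' :: t) = true := by simp [List.isPrefixOf]
        simp only [hpre, if_true]
        have hd : List.drop (['-'].length) ('-' :: t) = t := rfl
        rw [hd, ih t ([' '].reverse ++ acc) (by simpa using h)]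
        simp
      · have hpre : List.isPrefixOf ['-'] (c :: t) = false := by
          simp [List.isPrefixOf]
          exact fun hx => absurd hx.symm hc
        simp only [hpre, Bool.false_eq_true, if_false]
        rw [ih t (c :: acc) (by simpa using h)]
        simp [hc]

theorem replace_hyph (s : String) : PySem.Str.replace s "-" " " = pvHyph s := by
  have h : (PySem.Str.replace s "-" " ").toList = (pvHyph s).toList := by
    rw [PySem.Str.toList_replace]
    show PySem.Chars.replace s.toList ['-'] [' '] = _
    rw [PySem.Chars.replace]
    simp only [List.isEmpty_cons, Bool.false_eq_true, if_false]
    rw [pvHyph_go _ _ _ rfl]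
    simp [pvHyph]
  have := congrArg String.ofList h
  simpa using this

theorem pvHyph_eq_empty (x : String) (h : pvHyph x = "") : x = "" := by
  have := congrArg String.toList h
  simp [pvHyph] at this
  exact this

theorem pvHyph_beq_empty (x : String) : (pvHyph x == "") = (x == "") := by
  by_cases hx : x = ""
  · subst hx; decide
  · have h1 : (x == "") = false := by simpa using hx
    have h2 : (pvHyph x == "") = false := by
      simp only [beq_eq_false_iff_ne, ne_eq]
      intro hc
      exact hx (pvHyph_eq_empty x hc)
    rw [h1, h2]

-- A's loop body with the cleaned token as argument (the fold over args is the fold of this over the cleaned list).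
def pcaStepC (country_list : List String)
    (st : PySem.Dict String (List String) × Option String) (c : String) :
    PySem.Dict String (List String) × Option String :=
  if country_list.contains c then
    (st.1.insert c ([] : List String), some c)
  else
    match st.2 with
    | some cur =>
        if cur == "" then st
        else (st.1.modify cur [] (fun l => l ++ [c]), st.2)
    | none => st

theorem pca_foldl_clean (args country_list : List String)
    (st : PySem.Dict String (List String) × Option String) :
    args.foldl
      (fun (st : PySem.Dict String (List String) × Option String) arg =>
        let arg_clean := PySem.Str.replace arg "-" " "
        if country_list.contains arg_clean then
          (st.1.insert arg_clean ([] : List String), some arg_clean)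
        else
          match st.2 with
          | some cur =>
              if cur == "" then st
              else (st.1.modify cur [] (fun l => l ++ [arg_clean]), st.2)
          | none => st)
      st
    = (args.map (fun a => PySem.Str.replace a "-" " ")).foldl (pcaStepC country_list) st := by
  rw [List.foldl_map]
  rfl

theorem dict_insert_modify {κ ν : Type} [BEq κ] [LawfulBEq κ] (d : PySem.Dict κ ν) (k : κ) (v d0 : ν) (f : ν → ν) :
    (d.insert k v).modify k d0 f = d.insert k (f v) := by
  simp [PySem.Dict.modify, PySem.Dict.getD_insert_self, PySem.Dict.insert_insert_self]

theorem pcaStepC_country (country_list : List String)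
    (st : PySem.Dict String (List String) × Option String) (y : String)
    (hy : country_list.contains y = true) :
    pcaStepC country_list st y = (st.1.insert y ([] : List String), some y) := by
  unfold pcaStepC
  rw [if_pos hy]

theorem set_ofList_contains (cl : List String) (y : String) :
    PySem.Set.contains (PySem.Set.ofList cl) y = cl.contains y := by
  by_cases h : y ∈ cl <;>
    simp [PySem.Set.contains_eq_listContains, PySem.Set.mem_ofList, h]

-- ---- the '' patching map: normD d replaces the value stored at key "" by [] ----
def pvNormF (p : String × List String) : String × List String :=
  if p.1 == "" then ("", []) else p

def normD (d : PySem.Dict String (List String)) : PySem.Dict String (List String) :=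
  PySem.Dict.mk (d.items.map pvNormF)

theorem pvNormF_fst (p : String × List String) : (pvNormF p).1 = p.1 := by
  by_cases h : p.1 = "" <;> simp [pvNormF, h]

theorem keys_normD (d : PySem.Dict String (List String)) : (normD d).keys = d.keys := by
  show (d.items.map pvNormF).map (·.1) = d.items.map (·.1)
  rw [List.map_map]
  exact List.map_congr_left (fun p _ => pvNormF_fst p)

theorem contains_normD (d : PySem.Dict String (List String)) (k : String) :
    (normD d).contains k = d.contains k := by
  rw [PySem.Dict.contains_eq_decide_mem_keys, PySem.Dict.contains_eq_decide_mem_keys, keys_normD]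

theorem normD_insert (d : PySem.Dict String (List String)) (k : String) (v : List String) :
    normD (d.insert k v) = (normD d).insert k (if k == "" then [] else v) := by
  apply PySem.Dict.ext
  by_cases hc : d.contains k = true
  · have hc' : (normD d).contains k = true := by rw [contains_normD]; exact hc
    show ((d.insert k v).items).map pvNormF
        = ((normD d).insert k (if k == "" then [] else v)).items
    rw [PySem.Dict.items_insert_of_contains _ _ hc,
        PySem.Dict.items_insert_of_contains _ _ hc']
    show _ = ((d.items.map pvNormF).map _)
    rw [List.map_map, List.map_map]
    refine List.map_congr_left (fun p _ => ?_)
    by_cases hpk : p.1 = k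
    · by_cases hk : k = ""
      · subst hk
        simp [pvNormF, hpk]
      · have hk' : (k == "") = false := by simpa using hk
        simp [pvNormF, hpk, hk']
    · have h1 : (p.1 == k) = false := by simpa using hpk
      have h2 : ((pvNormF p).1 == k) = false := by rw [pvNormF_fst]; exact h1
      simp only [Function.comp_apply, h1, Bool.false_eq_true, if_false, h2]
  · have hcf : d.contains k = false := by simpa using hc
    have hc' : (normD d).contains k = false := by rw [contains_normD]; exact hcf
    show ((d.insert k v).items).map pvNormF
        = ((normD d).insert k (if k == "" then [] else v)).items
    rw [PySem.Dict.items_insert_of_not_contains _ _ hcf,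
        PySem.Dict.items_insert_of_not_contains _ _ hc']
    show (d.items ++ [(k, v)]).map pvNormF = (d.items.map pvNormF) ++ _
    rw [List.map_append]
    congr 1
    by_cases hk : k = ""
    · subst hk; simp [pvNormF]
    · have hk' : (k == "") = false := by simpa using hk
      simp [pvNormF, hk']

theorem get?_mk_map_normF (l : List (String × List String)) :
    (PySem.Dict.mk (l.map pvNormF)).get? ""
      = ((PySem.Dict.mk l).get? "").map (fun _ => ([] : List String)) := by
  induction l with
  | nil => rfl
  | cons p t ih =>
    rw [List.map_cons, PySem.Dict.get?_mk_cons, PySem.Dict.get?_mk_cons]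
    by_cases hp : p.1 = ""
    · have h1 : ((pvNormF p).1 == "") = true := by rw [pvNormF_fst]; simpa using hp
      have h2 : (p.1 == "") = true := by simpa using hp
      simp only [h1, h2, if_true]
      simp [pvNormF, hp]
    · have h1 : ((pvNormF p).1 == "") = false := by rw [pvNormF_fst]; simpa using hp
      have h2 : (p.1 == "") = false := by simpa using hp
      simp only [h1, h2, Bool.false_eq_true, if_false]
      exact ih

theorem get?_normD (d : PySem.Dict String (List String)) :
    (normD d).get? "" = (d.get? "").map (fun _ => ([] : List String)) := by
  have h := get?_mk_map_normF d.items
  exact h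

theorem normD_eq_self (d : PySem.Dict String (List String)) (hnd : d.keys.Nodup)
    (h : d.get? "" = none ∨ d.get? "" = some []) : normD d = d := by
  apply PySem.Dict.ext
  show d.items.map pvNormF = d.items
  have hpt : ∀ p ∈ d.items, pvNormF p = p := by
    intro p hp
    by_cases hpe : p.1 = ""
    · have hmem : ((""), p.2) ∈ d.items := by rw [← hpe]; exact hp
      have hg : d.get? "" = some p.2 := PySem.Dict.get?_of_mem_items _ hmem hnd
      rcases h with h | h
      · rw [hg] at h; exact absurd h (by simp)
      · rw [hg] at h
        have hv : p.2 = [] := by simpa using h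
        have : p = ("", []) := by
          cases p with
          | mk a b =>
            simp only at hpe hv
            rw [hpe, hv]
        rw [this]; rfl
    · simp [pvNormF, hpe]
  calc d.items.map pvNormF = d.items.map id := List.map_congr_left hpt
    _ = d.items := List.map_id _

-- ---- the suffix after the last "" ----
def pvAfterLast (xs : List String) : List String :=
  (xs.reverse.takeWhile (fun a => a != "")).reverse

theorem tw_append_of_mem (l l2 : List String) (h : "" ∈ l) :
    (l ++ l2).takeWhile (fun a => a != "") = l.takeWhile (fun a => a != "") := by
  induction l with
  | nil => simp at h
  | cons x t ih =>
    by_cases hx : x = ""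
    · subst hx
      simp
    · have hp : (x != "") = true := by simpa using hx
      have ht : "" ∈ t := by
        rcases List.mem_cons.mp h with h | h
        · exact absurd h.symm hx
        · exact h
      rw [List.cons_append, List.takeWhile_cons, List.takeWhile_cons, hp]
      simp only [if_true]
      rw [ih ht]

theorem tw_append_all (l l2 : List String) (h : ∀ a ∈ l, a ≠ "") :
    (l ++ l2).takeWhile (fun a => a != "") = l ++ l2.takeWhile (fun a => a != "") := by
  induction l with
  | nil => simp
  | cons x t ih =>
    have hx : (x != "") = true := by simpa using h x (by simp)
    rw [List.cons_append, List.takeWhile_cons, hx]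
    simp only [if_true, List.cons_append]
    rw [ih (fun a ha => h a (by simp [ha]))]

theorem afterLast_cons_of_mem (x : String) (xs : List String) (h : "" ∈ xs) :
    pvAfterLast (x :: xs) = pvAfterLast xs := by
  unfold pvAfterLast
  rw [List.reverse_cons, tw_append_of_mem _ _ (by simpa using h)]

theorem afterLast_of_not_mem (rest : List String) (h : "" ∉ rest) :
    pvAfterLast ("" :: rest) = rest := by
  unfold pvAfterLast
  rw [List.reverse_cons,
      tw_append_all _ _ (fun a ha => fun hae => h (by rw [← hae]; simpa using ha))]
  simp

theorem mem_dropWhile_of_pred_false {p : String → Bool} (hp : p "" = false) :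
    ∀ (l : List String), "" ∈ l → "" ∈ l.dropWhile p := by
  intro l hl
  induction l with
  | nil => simp at hl
  | cons x t ih =>
    by_cases hx : p x = true
    · rw [List.dropWhile_cons, hx]
      simp only [if_true]
      rcases List.mem_cons.mp hl with h | h
      · rw [← h] at hx; rw [hp] at hx; exact absurd hx (by simp)
      · exact ih h
    · have hx' : p x = false := by simpa using hx
      rw [List.dropWhile_cons, hx']
      simpa using hl

theorem afterLast_dropWhile {p : String → Bool}
    (l : List String) (h : "" ∈ l.dropWhile p) :
    pvAfterLast (l.dropWhile p) = pvAfterLast l := by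
  unfold pvAfterLast
  conv_rhs => rw [← List.takeWhile_append_dropWhile (p := p) (l := l)]
  rw [List.reverse_append,
      tw_append_of_mem _ _ (by simpa using h)]

-- keys inserted by pcaAltLoop come from xs: get? at "" is untouched when "" ∉ xs
theorem pcaAlt_get?_skip (cs : PySem.Set String) :
    ∀ (n : Nat) (xs : List String), xs.length ≤ n → "" ∉ xs →
      ∀ (res : PySem.Dict String (List String)),
        (pcaAltLoop cs res xs).get? "" = res.get? "" := by
  intro n
  induction n with
  | zero =>
    intro xs hlen _ res
    have : xs = [] := List.eq_nil_of_length_eq_zero (Nat.le_zero.mp hlen)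
    subst this
    simp [pcaAltLoop]
  | succ n ih =>
    intro xs hlen hmem res
    cases xs with
    | nil => simp [pcaAltLoop]
    | cons x rest =>
      have hxne : x ≠ "" := fun h => hmem (by simp [h])
      have hrest : "" ∉ rest := fun h => hmem (by simp [h])
      rw [pcaAltLoop]
      by_cases hx : PySem.Set.contains cs x = true
      · rw [if_pos hx]
        have hlen' : (rest.dropWhile (fun y => !PySem.Set.contains cs y)).length ≤ n := by
          have h1 := List.length_dropWhile_le (fun y => !PySem.Set.contains cs y) rest
          have h2 : rest.length ≤ n := by simpa using Nat.succ_le_succ_iff.mp hlen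
          omega
        have hmem' : "" ∉ rest.dropWhile (fun y => !PySem.Set.contains cs y) :=
          fun h => hrest ((List.dropWhile_sublist _).subset h)
        rw [ih _ hlen' hmem']
        exact PySem.Dict.get?_insert_of_ne _ _ (fun h => hxne h.symm)
      · rw [if_neg hx]
        exact ih _ (by simpa using Nat.succ_le_succ_iff.mp hlen) hrest res

-- the value stored at "" by pcaAltLoop: the non-country run after the LAST ""
theorem pcaAlt_get?_empty (cs : PySem.Set String) (h0 : PySem.Set.contains cs "" = true) :
    ∀ (n : Nat) (xs : List String), xs.length ≤ n → "" ∈ xs →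
      ∀ (res : PySem.Dict String (List String)),
        (pcaAltLoop cs res xs).get? ""
          = some ((pvAfterLast xs).takeWhile (fun y => !PySem.Set.contains cs y)) := by
  intro n
  induction n with
  | zero =>
    intro xs hlen hmem res
    have : xs = [] := List.eq_nil_of_length_eq_zero (Nat.le_zero.mp hlen)
    subst this; simp at hmem
  | succ n ih =>
    intro xs hlen hmem res
    cases xs with
    | nil => simp at hmem
    | cons x rest =>
      have hrlen : rest.length ≤ n := by simpa using Nat.succ_le_succ_iff.mp hlen
      rw [pcaAltLoop]
      by_cases hx : PySem.Set.contains cs x = true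
      · rw [if_pos hx]
        by_cases hr : "" ∈ rest
        · have hpf : (fun y => !PySem.Set.contains cs y) "" = false := by
            show (!PySem.Set.contains cs "") = false
            rw [h0]; rfl
          have hdw : "" ∈ rest.dropWhile (fun y => !PySem.Set.contains cs y) :=
            mem_dropWhile_of_pred_false hpf rest hr
          have hlen' : (rest.dropWhile (fun y => !PySem.Set.contains cs y)).length ≤ n := by
            have h1 := List.length_dropWhile_le (fun y => !PySem.Set.contains cs y) rest
            omega
          rw [ih _ hlen' hdw]
          rw [afterLast_dropWhile rest hdw, afterLast_cons_of_mem x rest hr]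
        · have hx0 : x = "" := by
            rcases List.mem_cons.mp hmem with h | h
            · exact h.symm
            · exact absurd h hr
          subst hx0
          have hlen' : (rest.dropWhile (fun y => !PySem.Set.contains cs y)).length ≤ n := by
            have h1 := List.length_dropWhile_le (fun y => !PySem.Set.contains cs y) rest
            omega
          have hmem' : "" ∉ rest.dropWhile (fun y => !PySem.Set.contains cs y) :=
            fun h => hr ((List.dropWhile_sublist _).subset h)
          rw [pcaAlt_get?_skip cs n _ hlen' hmem',
              PySem.Dict.get?_insert_self, afterLast_of_not_mem rest hr]
      · rw [if_neg hx]
        have hxne : x ≠ "" := by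
          intro h; subst h; exact hx h0
        have hr : "" ∈ rest := by
          rcases List.mem_cons.mp hmem with h | h
          · exact absurd h.symm hxne
          · exact h
        rw [ih rest hrlen hr res, afterLast_cons_of_mem x rest hr]

-- keys of pcaAltLoop stay Nodup
theorem pcaAlt_nodup (cs : PySem.Set String) :
    ∀ (n : Nat) (xs : List String), xs.length ≤ n →
      ∀ (res : PySem.Dict String (List String)), res.keys.Nodup →
        (pcaAltLoop cs res xs).keys.Nodup := by
  intro n
  induction n with
  | zero =>
    intro xs hlen res hres
    have : xs = [] := List.eq_nil_of_length_eq_zero (Nat.le_zero.mp hlen)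
    subst this; simpa [pcaAltLoop] using hres
  | succ n ih =>
    intro xs hlen res hres
    cases xs with
    | nil => simpa [pcaAltLoop] using hres
    | cons x rest =>
      have hrlen : rest.length ≤ n := by simpa using Nat.succ_le_succ_iff.mp hlen
      rw [pcaAltLoop]
      by_cases hx : PySem.Set.contains cs x = true
      · rw [if_pos hx]
        have hlen' : (rest.dropWhile (fun y => !PySem.Set.contains cs y)).length ≤ n := by
          have h1 := List.length_dropWhile_le (fun y => !PySem.Set.contains cs y) rest
          omega
        exact ih _ hlen' _ (PySem.Dict.nodup_keys_insert _ _ _ hres)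
      · rw [if_neg hx]
        exact ih rest hrlen res hres

-- ---- the central structural correspondence: A's fold = normD of B's loop ----
theorem pca_main2 (cl : List String) (cs : PySem.Set String)
    (hE : ∀ y, PySem.Set.contains cs y = cl.contains y) (xs : List String) :
    ∀ (b : PySem.Dict String (List String)) (c : String) (acc : List String),
      cl.contains c = true →
      (xs.foldl (pcaStepC cl) ((normD b).insert c (if c == "" then [] else acc), some c)).1
        = normD (pcaAltLoop cs
            (b.insert c (acc ++ xs.takeWhile (fun y => !PySem.Set.contains cs y)))
            (xs.dropWhile (fun y => !PySem.Set.contains cs y))) := by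
  induction xs with
  | nil =>
    intro b c acc _
    simp only [List.foldl_nil, List.takeWhile_nil, List.dropWhile_nil, List.append_nil]
    rw [pcaAltLoop, normD_insert]
  | cons y ys ih =>
    intro b c acc hc
    by_cases hy : cl.contains y = true
    · -- y is a country
      have hyE : PySem.Set.contains cs y = true := by rw [hE]; exact hy
      have hpy : (!PySem.Set.contains cs y) = false := by rw [hyE]; rfl
      have hy0 : (if (y == "") = true then ([] : List String) else ([] : List String)) = [] := by
        split <;> rfl
      have hA : ((normD b).insert c (if (c == "") = true then [] else acc))
          = normD (b.insert c acc) := (normD_insert b c acc).symm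
      have hrec := ih (b.insert c acc) y [] hy
      rw [hy0] at hrec
      rw [List.foldl_cons, pcaStepC_country cl _ y hy]
      simp only [hA]
      rw [hrec, List.takeWhile_cons, List.dropWhile_cons]
      simp only [hpy, Bool.false_eq_true, if_false, List.append_nil, List.nil_append]
      conv_rhs => rw [pcaAltLoop]
      rw [if_pos hyE]
    · -- y is a city
      have hyb : cl.contains y = false := by simpa using hy
      have hyE : PySem.Set.contains cs y = false := by rw [hE]; exact hyb
      have hpy : (!PySem.Set.contains cs y) = true := by rw [hyE]; rfl
      rw [List.takeWhile_cons, List.dropWhile_cons]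
      simp only [hpy, if_true]
      by_cases hce : c = ""
      · -- current country is "": A drops the city (truthiness), B's slice keeps it
        subst hce
        have he : (if (("" : String) == "") = true then ([] : List String) else acc) = [] := rfl
        have he2 : (if (("" : String) == "") = true then ([] : List String) else (acc ++ [y])) = [] := rfl
        have hstep : pcaStepC cl ((normD b).insert "" ([] : List String), some "") y
            = ((normD b).insert "" ([] : List String), some "") := by
          unfold pcaStepC
          rw [if_neg (by simpa using hyb)]
          rfl
        have hrec := ih b "" (acc ++ [y]) hc
        rw [he2] at hrec
        rw [he, List.foldl_cons, hstep, hrec, List.append_assoc]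
        rfl
      · -- current country is a real name: A appends the city
        have hce' : (c == "") = false := by simpa using hce
        have he : (if (c == "") = true then ([] : List String) else acc) = acc := by
          rw [hce']; rfl
        have he2 : (if (c == "") = true then ([] : List String) else (acc ++ [y])) = acc ++ [y] := by
          rw [hce']; rfl
        have hstep : pcaStepC cl ((normD b).insert c acc, some c) y
            = ((normD b).insert c (acc ++ [y]), some c) := by
          unfold pcaStepC
          rw [if_neg (by simpa using hyb)]
          show (if (c == "") = true then _ else _) = _
          rw [hce']
          simp only [Bool.false_eq_true, if_false]
          rw [dict_insert_modify]
        have hrec := ih b c (acc ++ [y]) hc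
        rw [he2] at hrec
        rw [he, List.foldl_cons, hstep, hrec, List.append_assoc]
        rfl

theorem pca_top2 (cl : List String) (cs : PySem.Set String)
    (hE : ∀ y, PySem.Set.contains cs y = cl.contains y) (xs : List String) :
    ∀ (b : PySem.Dict String (List String)),
      (xs.foldl (pcaStepC cl) (normD b, none)).1 = normD (pcaAltLoop cs b xs) := by
  induction xs with
  | nil => intro b; simp [pcaAltLoop]
  | cons y ys ih =>
    intro b
    by_cases hy : cl.contains y = true
    · have hyE : PySem.Set.contains cs y = true := by rw [hE]; exact hy
      have hy0 : (if (y == "") = true then ([] : List String) else ([] : List String)) = [] := by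
        split <;> rfl
      have hrec := pca_main2 cl cs hE ys b y [] hy
      rw [hy0] at hrec
      rw [List.foldl_cons, pcaStepC_country cl _ y hy, hrec]
      simp only [List.nil_append]
      conv_rhs => rw [pcaAltLoop]
      rw [if_pos hyE]
    · have hyb : cl.contains y = false := by simpa using hy
      have hyE : PySem.Set.contains cs y = false := by rw [hE]; exact hyb
      have hstep : pcaStepC cl (normD b, none) y = (normD b, none) := by
        unfold pcaStepC
        rw [if_neg (by simpa using hyb)]
      rw [List.foldl_cons, hstep, ih b]
      conv_rhs => rw [pcaAltLoop]
      rw [if_neg (by simpa using hyE)]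

-- the two dicts computed by the two ports on the cleaned list
theorem pca_norm (args cl : List String) :
    ((args.map pvHyph).foldl (pcaStepC cl) (PySem.Dict.empty, none)).1
      = normD (pcaAltLoop (PySem.Set.ofList cl) PySem.Dict.empty (args.map pvHyph)) := by
  have h0 : (PySem.Dict.empty : PySem.Dict String (List String)) = normD PySem.Dict.empty := rfl
  conv_lhs => rw [h0]
  exact pca_top2 cl (PySem.Set.ofList cl) (fun y => set_ofList_contains cl y) _ PySem.Dict.empty

-- the cleaned list relates to the raw one
theorem tw_map_pvHyph (l : List String) :
    (l.map pvHyph).takeWhile (fun a => a != "") = (l.takeWhile (fun a => a != "")).map pvHyph := by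
  induction l with
  | nil => rfl
  | cons x t ih =>
    rw [List.map_cons, List.takeWhile_cons, List.takeWhile_cons]
    have hbe : (pvHyph x != "") = (x != "") := by rw [bne, bne, pvHyph_beq_empty]
    rw [hbe]
    by_cases hx : (x != "") = true
    · rw [hx]
      simp only [if_true]
      rw [ih, List.map_cons]
    · have hx' : (x != "") = false := by simpa using hx
      rw [hx']
      simp

theorem afterLast_map_pvHyph (l : List String) :
    pvAfterLast (l.map pvHyph) = (pvAfterLast l).map pvHyph := by
  unfold pvAfterLast
  rw [← List.map_reverse, tw_map_pvHyph, List.map_reverse]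

theorem mem_empty_map_pvHyph (l : List String) (h : "" ∈ l) : "" ∈ l.map pvHyph := by
  have : pvHyph "" = "" := by decide
  rw [← this]
  exact List.mem_map_of_mem h

theorem hyph_map_clean (args : List String) :
    args.map (fun a => PySem.Str.replace a "-" " ") = args.map pvHyph :=
  List.map_congr_left (fun a _ => replace_hyph a)

-- ===== VERDICT (by name: the statement is the Claim_ definition above) =====
theorem parse_city_arguments_spec : Claim_unchanged_parse_city_arguments := by
  intro args cl _dom hD
  unfold parse_city_arguments parse_city_arguments_alt
  rw [pca_foldl_clean, hyph_map_clean, pca_norm]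
  congr 1
  set Bd := pcaAltLoop (PySem.Set.ofList cl) PySem.Dict.empty (args.map pvHyph) with hBd
  have hnd : Bd.keys.Nodup := by
    rw [hBd]
    exact pcaAlt_nodup _ (args.map pvHyph).length _ le_rfl _ (by simp [PySem.Dict.keys_empty])
  apply normD_eq_self Bd hnd
  by_cases h0 : cl.contains "" = true
  · by_cases hm : "" ∈ args
    · -- "" occurs; since ¬D_, the run after the last "" is empty
      have h0' : PySem.Set.contains (PySem.Set.ofList cl) "" = true := by
        rw [set_ofList_contains]; exact h0
      have hmc : "" ∈ args.map pvHyph := mem_empty_map_pvHyph args hm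
      right
      rw [hBd, pcaAlt_get?_empty _ h0' (args.map pvHyph).length _ le_rfl hmc]
      rw [afterLast_map_pvHyph]
      -- the third conjunct of D_ is false
      have hm0 : args.contains "" = true := by simpa using hm
      have hS : ((args.reverse.takeWhile (fun a => a != "")).getLast?.any
          (fun y => !cl.contains (pvHyph y))) = false := by
        by_cases hS' : ((args.reverse.takeWhile (fun a => a != "")).getLast?.any
            (fun y => !cl.contains (pvHyph y))) = true
        · exact absurd (show (cl.contains "" && args.contains "" &&
              (args.reverse.takeWhile (fun a => a != "")).getLast?.any
                (fun y => !cl.contains (pvHyph y))) = true by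
              rw [h0, hm0, hS']; rfl) hD
        · simpa using hS'
      have hlast : (args.reverse.takeWhile (fun a => a != "")).getLast? = (pvAfterLast args).head? := by
        unfold pvAfterLast
        rw [List.head?_reverse]
      rw [hlast] at hS
      cases hh : (pvAfterLast args).head? with
      | none =>
        have : pvAfterLast args = [] := by
          cases hx : pvAfterLast args with
          | nil => rfl
          | cons a t => rw [hx] at hh; simp at hh
        rw [this]
        rfl
      | some y =>
        obtain ⟨t, ht⟩ : ∃ t, pvAfterLast args = y :: t := by
          cases hx : pvAfterLast args with
          | nil => rw [hx] at hh; simp at hh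
          | cons a t => rw [hx] at hh; simp at hh; exact ⟨t, by rw [hh]⟩
        rw [hh] at hS
        have hS2 : (!cl.contains (pvHyph y)) = false := hS
        have hyc : cl.contains (pvHyph y) = true := by
          by_cases hcc : cl.contains (pvHyph y) = true
          · exact hcc
          · exfalso
            have hccf : cl.contains (pvHyph y) = false := by simpa using hcc
            rw [hccf] at hS2
            simp at hS2
        rw [ht, List.map_cons, List.takeWhile_cons]
        have hif : (!PySem.Set.contains (PySem.Set.ofList cl) (pvHyph y)) = false := by
          rw [set_ofList_contains, hyc]; rfl
        simp only [hif, Bool.false_eq_true, if_false]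
    · -- "" never occurs among the cleaned args: no "" key at all
      left
      have hmc : "" ∉ args.map pvHyph := by
        intro h
        obtain ⟨a, ha, hae⟩ := List.mem_map.mp h
        exact hm (by rw [← pvHyph_eq_empty a hae]; exact ha)
      rw [hBd, pcaAlt_get?_skip _ (args.map pvHyph).length _ le_rfl hmc]
      exact PySem.Dict.get?_empty _
  · -- "" is not a country name: the "" key is never inserted
    left
    have h0' : PySem.Set.contains (PySem.Set.ofList cl) "" = false := by
      rw [set_ofList_contains]; simpa using h0
    -- reuse the skip lemma shape: every insert key x has contains x = true ≠ ""
    have : ∀ (n : Nat) (xs : List String), xs.length ≤ n →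
        ∀ (res : PySem.Dict String (List String)),
          (pcaAltLoop (PySem.Set.ofList cl) res xs).get? "" = res.get? "" := by
      intro n
      induction n with
      | zero =>
        intro xs hlen res
        have : xs = [] := List.eq_nil_of_length_eq_zero (Nat.le_zero.mp hlen)
        subst this; simp [pcaAltLoop]
      | succ n ih =>
        intro xs hlen res
        cases xs with
        | nil => simp [pcaAltLoop]
        | cons x rest =>
          have hrlen : rest.length ≤ n := by simpa using Nat.succ_le_succ_iff.mp hlen
          rw [pcaAltLoop]
          by_cases hx : PySem.Set.contains (PySem.Set.ofList cl) x = true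
          · rw [if_pos hx]
            have hxne : x ≠ "" := by
              intro h; subst h; rw [h0'] at hx; exact absurd hx (by simp)
            have hlen' : (rest.dropWhile (fun y => !PySem.Set.contains (PySem.Set.ofList cl) y)).length ≤ n := by
              have h1 := List.length_dropWhile_le (fun y => !PySem.Set.contains (PySem.Set.ofList cl) y) rest
              omega
            rw [ih _ hlen']
            exact PySem.Dict.get?_insert_of_ne _ _ (fun h => hxne h.symm)
          · rw [if_neg hx]
            exact ih rest hrlen res
    rw [hBd, this (args.map pvHyph).length _ le_rfl]
    exact PySem.Dict.get?_empty _

theorem parse_city_arguments_changed : Claim_changed_parse_city_arguments := by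
  unfold Claim_changed_parse_city_arguments
  refine ⟨by decide, by decide, by decide, ?_, by decide⟩
  show parse_city_arguments_alt ["", "x"] [""] = [("", ["x"])]
  have e1 : PySem.Str.replace "" "-" " " = "" := by decide
  have e2 : PySem.Str.replace "x" "-" " " = "x" := by decide
  simp [parse_city_arguments_alt, pcaAltLoop, e1, e2]
  decide

theorem parse_city_arguments_tight : Claim_exact_parse_city_arguments := by
  intro args cl _dom hd heq
  have hd' : (cl.contains "" && args.contains "" &&
      (args.reverse.takeWhile (fun a => a != "")).getLast?.any
        (fun y => !cl.contains (pvHyph y))) = true := hd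
  have h0 : cl.contains "" = true := by
    rcases Bool.and_eq_true_iff.mp hd' with ⟨h01, _⟩
    exact (Bool.and_eq_true_iff.mp h01).1
  have hm : args.contains "" = true := by
    rcases Bool.and_eq_true_iff.mp hd' with ⟨h01, _⟩
    exact (Bool.and_eq_true_iff.mp h01).2
  have hS : ((args.reverse.takeWhile (fun a => a != "")).getLast?.any
      (fun y => !cl.contains (pvHyph y))) = true :=
    (Bool.and_eq_true_iff.mp hd').2
  have hm' : "" ∈ args := by simpa using hm
  -- both sides as dicts over the cleaned list
  unfold parse_city_arguments parse_city_arguments_alt at heq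
  rw [pca_foldl_clean, hyph_map_clean, pca_norm] at heq
  set Bd := pcaAltLoop (PySem.Set.ofList cl) PySem.Dict.empty (args.map pvHyph) with hBd
  have hdict : normD Bd = Bd := PySem.Dict.ext heq
  -- B stores a nonempty city list at ""
  have h0' : PySem.Set.contains (PySem.Set.ofList cl) "" = true := by
    rw [set_ofList_contains]; exact h0
  have hmc : "" ∈ args.map pvHyph := mem_empty_map_pvHyph args hm'
  have hBv : Bd.get? ""
      = some ((pvAfterLast (args.map pvHyph)).takeWhile
          (fun y => !PySem.Set.contains (PySem.Set.ofList cl) y)) := by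
    rw [hBd]
    exact pcaAlt_get?_empty _ h0' (args.map pvHyph).length _ le_rfl hmc PySem.Dict.empty
  have hlast : (args.reverse.takeWhile (fun a => a != "")).getLast? = (pvAfterLast args).head? := by
    unfold pvAfterLast
    rw [List.head?_reverse]
  rw [hlast] at hS
  cases hh : (pvAfterLast args).head? with
  | none => rw [hh] at hS; simp at hS
  | some y =>
    rw [hh] at hS
    have hS2 : (!cl.contains (pvHyph y)) = true := hS
    have hyc : cl.contains (pvHyph y) = false := by
      by_cases hcc : cl.contains (pvHyph y) = true
      · exfalso
        rw [hcc] at hS2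
        simp at hS2
      · simpa using hcc
    obtain ⟨t, ht⟩ : ∃ t, pvAfterLast args = y :: t := by
      cases hx : pvAfterLast args with
      | nil => rw [hx] at hh; simp at hh
      | cons a t => rw [hx] at hh; simp at hh; exact ⟨t, by rw [hh]⟩
    have hpred : (!PySem.Set.contains (PySem.Set.ofList cl) (pvHyph y)) = true := by
      rw [set_ofList_contains, hyc]; rfl
    have hBv' : Bd.get? "" = some (pvHyph y :: (t.map pvHyph).takeWhile
        (fun y => !PySem.Set.contains (PySem.Set.ofList cl) y)) := by
      rw [hBv, afterLast_map_pvHyph, ht, List.map_cons, List.takeWhile_cons]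
      simp only [hpred, if_true]
    -- but normD Bd stores [] there — contradiction with normD Bd = Bd
    have := congrArg (fun d => d.get? "") hdict
    simp only at this
    rw [get?_normD, hBv'] at this
    simp at this
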